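-- pv_equiv track=rewrite | github.com/gaetano-7/FDP1 | DMJ Tracce + Esercizi/Esercizi/E2.py | ric_rig
-- ===== SOURCE A (Python) =====
-- def ric_rig(L_rig,mat,f,g,N):
--     cont=0
--     s=[]
--     if g>=N+1:
--         return s
--     else:
--         for i in range(f,g):
--             for j in range(N):
--                 if mat[i][j]==1:
--                     cont+=1
--         s.append(cont)
--         return s + ric_rig(L_rig,mat,f+1,g+1,N)
-- ===== SOURCE B (Python) =====
-- def ric_rig(L_rig, mat, f, g, N):
--     if g >= N + 1:
--         return []
--     if f >= g:
--         return [0] * (N + 1 - g)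
--     rows = [sum(1 for j in range(N) if mat[i][j] == 1) for i in range(f, N)]
--     w = g - f
--     cur = sum(rows[:w])
--     out = [cur]
--     for t in range(N - g):
--         cur += rows[w + t] - rows[t]
--         out.append(cur)
--     return out
-- ===== Notes on version B (the rewrite author's own statement) =====
-- stated objective: alternative
-- what changed: A recounts the 1s of every row of every window with nested loops inside a recursion; B counts each row's 1s once, sums the first window, and slides the window by adding/subtracting one precomputed row count per step.
import Mathlib
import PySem

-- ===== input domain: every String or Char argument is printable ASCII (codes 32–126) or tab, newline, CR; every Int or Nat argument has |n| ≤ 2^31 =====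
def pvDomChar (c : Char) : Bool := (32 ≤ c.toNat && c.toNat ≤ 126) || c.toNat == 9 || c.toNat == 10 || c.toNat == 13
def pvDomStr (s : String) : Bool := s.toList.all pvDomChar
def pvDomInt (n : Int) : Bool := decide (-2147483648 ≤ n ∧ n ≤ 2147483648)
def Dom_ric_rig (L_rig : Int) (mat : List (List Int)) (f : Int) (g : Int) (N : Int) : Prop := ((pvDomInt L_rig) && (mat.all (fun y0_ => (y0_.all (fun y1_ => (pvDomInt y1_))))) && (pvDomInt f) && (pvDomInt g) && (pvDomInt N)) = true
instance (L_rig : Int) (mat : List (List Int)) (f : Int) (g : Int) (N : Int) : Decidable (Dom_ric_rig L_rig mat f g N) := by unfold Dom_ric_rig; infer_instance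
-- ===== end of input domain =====

-- B replaces A's re-count of every row of every window by per-row counts computed once plus an
-- incremental sliding-window update (objective: alternative algorithm).

-- ===== PORT A =====
-- literal transliteration of A: nested for-loops counting 1s in rows [f,g), then recursion on (f+1,g+1)
def ric_rig (L_rig : Int) (mat : List (List Int)) (f : Int) (g : Int) (N : Int) : List Int :=
  if _h : g ≥ N + 1 then []
  else
    let cont := (PySem.List.pyRange f g 1).foldl (fun c i =>
      (PySem.List.pyRange 0 N 1).foldl (fun c j =>
        if PySem.List.pyGetD (PySem.List.pyGetD mat i []) j (0 : Int) == 1 then c + 1 else c) c) 0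
    cont :: ric_rig L_rig mat (f + 1) (g + 1) N
termination_by (N + 1 - g).toNat
decreasing_by omega

-- ===== PORT B =====
-- literal transliteration of Source B: per-row 1-counts once, then sliding-window updates
def ric_rig_alt (L_rig : Int) (mat : List (List Int)) (f : Int) (g : Int) (N : Int) : List Int :=
  if g ≥ N + 1 then []
  else if f ≥ g then List.replicate (N + 1 - g).toNat (0 : Int)
  else
    let rows : List Int := (PySem.List.pyRange f N 1).map (fun i =>
      (((PySem.List.pyRange 0 N 1).filter
        (fun j => PySem.List.pyGetD (PySem.List.pyGetD mat i []) j (0 : Int) == 1)).length : Int))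
    let w := g - f
    let cur0 := (rows.take w.toNat).sum
    let res := (PySem.List.pyRange 0 (N - g) 1).foldl (fun (p : Int × List Int) t =>
      let cur := p.1 + PySem.List.pyGetD rows (w + t) 0 - PySem.List.pyGetD rows t 0
      (cur, p.2 ++ [cur])) (cur0, [cur0])
    res.2

-- ===== PRECONDITION & SPEC =====
-- Pre_ excludes exactly the inputs where Python A raises IndexError: whenever some window is
-- nonempty (f < g ≤ N) and a column is read (0 < N), every read row index in [f,N) must be a
-- valid (possibly negative, Python-style) index into mat and that row must have ≥ N entries.
-- Pre_ also excludes inputs with more than 900 windows (N + 1 - g > 900 with g ≤ N): there A's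
-- recursion depth N+1-g approaches CPython's recursion limit and raises RecursionError at a
-- depth that depends on the caller's stack, so a margin below the limit is excluded.
def Pre_ric_rig (L_rig : Int) (mat : List (List Int)) (f : Int) (g : Int) (N : Int) : Prop :=
  (g ≤ N → N + 1 - g ≤ 900) ∧
  (g ≤ N → f < g → 0 < N →
    ∀ i ∈ PySem.List.pyRange f N 1,
      PySem.Raise.InRange mat.length i ∧ N ≤ ((PySem.List.pyGetD mat i []).length : Int))
instance (L_rig : Int) (mat : List (List Int)) (f : Int) (g : Int) (N : Int) : Decidable (Pre_ric_rig L_rig mat f g N) := by unfold Pre_ric_rig; infer_instance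

def pvWitness_ric_rig : Int × List (List Int) × Int × Int × Int := (0, [[1, 0], [1, 1]], 0, 1, 2)

def Spec_ric_rig (L_rig : Int) (mat : List (List Int)) (f : Int) (g : Int) (N : Int) (out : List Int) : Prop := out = ric_rig_alt L_rig mat f g N
instance (L_rig : Int) (mat : List (List Int)) (f : Int) (g : Int) (N : Int) (out : List Int) : Decidable (Spec_ric_rig L_rig mat f g N out) := by unfold Spec_ric_rig; infer_instance

-- ===== CLAIM (what is proved, stated in full; the proofs are below) =====
def Claim_equal_ric_rig : Prop := ∀ (L_rig : Int) (mat : List (List Int)) (f : Int) (g : Int) (N : Int), Dom_ric_rig L_rig mat f g N → Pre_ric_rig L_rig mat f g N → Spec_ric_rig L_rig mat f g N (ric_rig L_rig mat f g N)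

-- ===== LEMMAS AND PROOFS =====

-- count of 1s in row i restricted to columns [0,N) (definitionally B's per-row count)
def rcnt (mat : List (List Int)) (N : Int) (i : Int) : Int :=
  (((PySem.List.pyRange 0 N 1).filter
    (fun j => PySem.List.pyGetD (PySem.List.pyGetD mat i []) j (0 : Int) == 1)).length : Int)

-- sum of rcnt over rows [a,b)
def wsum (mat : List (List Int)) (N : Int) (a b : Int) : Int :=
  ((PySem.List.pyRange a b 1).map (rcnt mat N)).sum

-- the common specification value: the list of window sums
def windows (mat : List (List Int)) (f g N : Int) : List Int :=
  (List.range (N + 1 - g).toNat).map (fun t : Nat => wsum mat N (f + (t : Int)) (g + (t : Int)))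

-- B's main branch, written without the let-bindings (definitionally equal to the port's branch)
def altCore (mat : List (List Int)) (f g N : Int) : List Int :=
  ((PySem.List.pyRange 0 (N - g) 1).foldl (fun (p : Int × List Int) t =>
      (p.1 + PySem.List.pyGetD ((PySem.List.pyRange f N 1).map (rcnt mat N)) ((g - f) + t) 0
           - PySem.List.pyGetD ((PySem.List.pyRange f N 1).map (rcnt mat N)) t 0,
       p.2 ++ [p.1 + PySem.List.pyGetD ((PySem.List.pyRange f N 1).map (rcnt mat N)) ((g - f) + t) 0
                  - PySem.List.pyGetD ((PySem.List.pyRange f N 1).map (rcnt mat N)) t 0]))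
    ((((PySem.List.pyRange f N 1).map (rcnt mat N)).take (g - f).toNat).sum,
     [(((PySem.List.pyRange f N 1).map (rcnt mat N)).take (g - f).toNat).sum])).2

theorem alt_eq_core (L_rig : Int) (mat : List (List Int)) (f g N : Int) :
    ric_rig_alt L_rig mat f g N
      = if g ≥ N + 1 then [] else if f ≥ g then List.replicate (N + 1 - g).toNat (0 : Int)
        else altCore mat f g N := rfl

theorem wsum_shift (mat : List (List Int)) (N : Int) {a b : Int} (h : a ≤ b) :
    wsum mat N (a + 1) (b + 1) = wsum mat N a b + rcnt mat N b - rcnt mat N a := by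
  have h1 : PySem.List.pyRange a (b + 1) 1
      = PySem.List.pyRange a (a + 1) 1 ++ PySem.List.pyRange (a + 1) (b + 1) 1 :=
    PySem.List.pyRange_one_append a (a + 1) (b + 1) (by omega) (by omega)
  have h2 : PySem.List.pyRange a (b + 1) 1 = PySem.List.pyRange a b 1 ++ [b] :=
    PySem.List.pyRange_one_succ_right h
  have h3 := congrArg (fun l => (l.map (rcnt mat N)).sum) (h1.symm.trans h2)
  simp [PySem.List.pyRange_one_singleton] at h3
  unfold wsum
  omega

theorem fold_cont_eq (mat : List (List Int)) (N : Int) (l : List Int) (c : Int) :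
    l.foldl (fun c i =>
      (PySem.List.pyRange 0 N 1).foldl (fun c j =>
        if PySem.List.pyGetD (PySem.List.pyGetD mat i []) j (0 : Int) == 1 then c + 1 else c) c) c
    = c + (l.map (rcnt mat N)).sum := by
  have hstep : l.foldl (fun c i =>
      (PySem.List.pyRange 0 N 1).foldl (fun c j =>
        if PySem.List.pyGetD (PySem.List.pyGetD mat i []) j (0 : Int) == 1 then c + 1 else c) c) c
      = l.foldl (fun c i => c + rcnt mat N i) c := by
    apply PySem.List.foldl_congr_mem
    intro acc x _
    rw [PySem.List.foldl_if_add_one, rcnt, List.countP_eq_length_filter]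
  rw [hstep, PySem.List.foldl_add]

theorem rows_get (mat : List (List Int)) (N f : Int) (t : Int) (h0 : 0 ≤ t) (h1 : t < N - f) :
    PySem.List.pyGetD ((PySem.List.pyRange f N 1).map (rcnt mat N)) t 0 = rcnt mat N (f + t) := by
  have hlen : ((((PySem.List.pyRange f N 1).map (rcnt mat N)).length : Nat) : Int) = N - f := by
    simp [PySem.List.length_pyRange_one]; omega
  rw [PySem.List.pyGetD_eq_getElem _ 0 h0 (by omega)]
  rw [List.getElem_map, PySem.List.getElem_pyRange_one]
  congr 1
  omega

theorem ric_rig_eq_windows (L_rig : Int) (mat : List (List Int)) (N : Int) :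
    ∀ (k : Nat) (f g : Int), (N + 1 - g).toNat = k →
      ric_rig L_rig mat f g N = windows mat f g N := by
  intro k
  induction k with
  | zero =>
    intro f g hk
    rw [ric_rig, windows]
    rw [dif_pos (by omega), hk]
    simp
  | succ k ih =>
    intro f g hk
    rw [ric_rig, dif_neg (by omega)]
    simp only [fold_cont_eq, zero_add]
    rw [ih (f + 1) (g + 1) (by omega)]
    unfold windows
    rw [hk]
    have hr2 : (N + 1 - (g + 1)).toNat = k := by omega
    rw [hr2, List.range_succ_eq_map]
    simp only [List.map_cons, List.map_map]
    congr 1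
    · unfold wsum; norm_num
    · apply List.map_congr_left
      intro t _
      congr 1 <;> push_cast <;> ring

theorem altCore_eq_windows (mat : List (List Int)) (f g N : Int)
    (hf : f < g) (hg : g ≤ N) : altCore mat f g N = windows mat f g N := by
  have hcur0 : ((((PySem.List.pyRange f N 1).map (rcnt mat N)).take (g - f).toNat).sum)
      = wsum mat N f g := by
    rw [PySem.List.pyRange_one_append f g N (by omega) hg, List.map_append]
    have hl : ((PySem.List.pyRange f g 1).map (rcnt mat N)).length = (g - f).toNat := by
      simp [PySem.List.length_pyRange_one]
    rw [← hl, List.take_left]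
    rfl
  have hloop : ∀ (k : Nat), (k : Int) ≤ N - g →
      (PySem.List.pyRange 0 (k : Int) 1).foldl (fun (p : Int × List Int) t =>
        (p.1 + PySem.List.pyGetD ((PySem.List.pyRange f N 1).map (rcnt mat N)) ((g - f) + t) 0
             - PySem.List.pyGetD ((PySem.List.pyRange f N 1).map (rcnt mat N)) t 0,
         p.2 ++ [p.1 + PySem.List.pyGetD ((PySem.List.pyRange f N 1).map (rcnt mat N)) ((g - f) + t) 0
                    - PySem.List.pyGetD ((PySem.List.pyRange f N 1).map (rcnt mat N)) t 0]))
        (wsum mat N f g, [wsum mat N f g])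
      = (wsum mat N (f + k) (g + k),
         (List.range (k + 1)).map (fun t : Nat => wsum mat N (f + (t : Int)) (g + (t : Int)))) := by
    intro k
    induction k with
    | zero =>
      intro _
      have : ((0 : Nat) : Int) = 0 := rfl
      rw [this, PySem.List.pyRange_one_eq_nil (le_refl (0 : Int))]
      simp
    | succ k ihk =>
      intro hk
      have hk' : (k : Int) ≤ N - g := by push_cast at hk ⊢; omega
      have hsplit : PySem.List.pyRange 0 (((k + 1 : Nat)) : Int) 1
          = PySem.List.pyRange 0 (k : Int) 1 ++ [(k : Int)] := by
        push_cast
        exact PySem.List.pyRange_one_succ_right (by omega)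
      rw [hsplit, List.foldl_append, ihk hk']
      simp only [List.foldl_cons, List.foldl_nil]
      have hg1 : PySem.List.pyGetD ((PySem.List.pyRange f N 1).map (rcnt mat N)) ((g - f) + (k : Int)) 0
          = rcnt mat N (g + k) := by
        rw [rows_get mat N f ((g - f) + k) (by omega) (by push_cast at hk; omega)]
        congr 1; ring
      have hg2 : PySem.List.pyGetD ((PySem.List.pyRange f N 1).map (rcnt mat N)) (k : Int) 0
          = rcnt mat N (f + k) := by
        exact rows_get mat N f k (by omega) (by push_cast at hk; omega)
      rw [hg1, hg2]
      have hws : wsum mat N (f + (k : Int)) (g + (k : Int)) + rcnt mat N (g + (k : Int))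
            - rcnt mat N (f + (k : Int))
          = wsum mat N (f + ((k : Int) + 1)) (g + ((k : Int) + 1)) := by
        have hsh := wsum_shift mat N (a := f + (k : Int)) (b := g + (k : Int)) (by omega)
        rw [show f + ((k : Int) + 1) = (f + (k : Int)) + 1 by ring,
            show g + ((k : Int) + 1) = (g + (k : Int)) + 1 by ring, hsh]
      simp only [Prod.mk.injEq]
      constructor
      · rw [hws]; push_cast; ring_nf
      · rw [List.range_succ (n := k + 1), List.map_append]
        simp only [List.map_cons, List.map_nil]
        rw [hws]
        push_cast
        ring_nf
  have hNg : PySem.List.pyRange 0 (N - g) 1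
      = PySem.List.pyRange 0 (((N - g).toNat : Nat) : Int) 1 := by
    congr 1; omega
  unfold altCore
  rw [hcur0, hNg, hloop (N - g).toNat (by omega)]
  unfold windows
  have : (N + 1 - g).toNat = (N - g).toNat + 1 := by omega
  rw [this]

theorem ric_rig_alt_eq_windows (L_rig : Int) (mat : List (List Int)) (f g N : Int) :
    ric_rig_alt L_rig mat f g N = windows mat f g N := by
  rw [alt_eq_core]
  by_cases hge : g ≥ N + 1
  · rw [if_pos hge]
    unfold windows
    have : (N + 1 - g).toNat = 0 := by omega
    rw [this]; simp
  · rw [if_neg hge]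
    have hgN : g ≤ N := by omega
    by_cases hfg : f ≥ g
    · rw [if_pos hfg]
      symm
      rw [List.eq_replicate_iff]
      refine ⟨by simp [windows], ?_⟩
      intro b hb
      unfold windows at hb
      simp only [List.mem_map, List.mem_range] at hb
      obtain ⟨t, _, rfl⟩ := hb
      unfold wsum
      rw [PySem.List.pyRange_one_eq_nil (by omega)]
      simp
    · rw [if_neg hfg]
      exact altCore_eq_windows mat f g N (by omega) hgN

-- ===== VERDICT (by name: the statement is the Claim_ definition above) =====
theorem ric_rig_spec : Claim_equal_ric_rig := by
  intro L_rig mat f g N _hdom _hpre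
  unfold Spec_ric_rig
  rw [ric_rig_eq_windows L_rig mat N (N + 1 - g).toNat f g rfl,
      ric_rig_alt_eq_windows]
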